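-- pv_equiv track=rewrite | github.com/segara2410/network-security | sdes.py | TripleDES_3key_encrypt
-- ===== SOURCE A (Python) =====
-- KeyLength = 10
--
-- IPtable = (2, 6, 3, 1, 4, 8, 5, 7)
--
-- FPtable = (4, 1, 3, 5, 7, 2, 8, 6)
--
-- P10table = (3, 5, 2, 7, 4, 10, 1, 9, 8, 6)
--
-- P8table = (6, 3, 7, 4, 8, 5, 10, 9)
--
-- EPtable = (4, 1, 2, 3, 2, 3, 4, 1)
--
-- S0table = (1, 0, 3, 2, 3, 2, 1, 0, 0, 2, 1, 3, 3, 1, 3, 2)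
--
-- S1table = (0, 1, 2, 3, 2, 0, 1, 3, 3, 0, 1, 0, 2, 1, 0, 3)
--
-- P4table = (2, 4, 3, 1)
--
-- def perm(inputByte, permTable):
--     """Permute input byte according to permutation table"""
--     outputByte = 0
--     for index, elem in enumerate(permTable):
--         if index >= elem:
--             outputByte |= (inputByte & (128 >> (elem - 1))) >> (index - (elem - 1))
--         else:
--             outputByte |= (inputByte & (128 >> (elem - 1))) << ((elem - 1) - index)
--     return outputByte
--
-- def ip(inputByte):
--     """Perform the initial permutation on data"""
--     return perm(inputByte, IPtable)
--
-- def fp(inputByte):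
--     """Perform the final permutation on data"""
--     return perm(inputByte, FPtable)
--
-- def swapNibbles(inputByte):
--     """Swap the two nibbles of data"""
--     return (inputByte << 4 | inputByte >> 4) & 0xff
--
-- def keyGen(key):
--     """Generate the two required subkeys"""
--     def leftShift(keyBitList):
--         """Perform a circular left shift on the first and second five bits"""
--         shiftedKey = [None] * KeyLength
--         shiftedKey[0:9] = keyBitList[1:10]
--         shiftedKey[4] = keyBitList[0]
--         shiftedKey[9] = keyBitList[5]
--         return shiftedKey
--
--     # Converts input key (integer) into a list of binary digits
--     keyList = [(key & 1 << i) >> i for i in reversed(range(KeyLength))]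
--     permKeyList = [None] * KeyLength
--     for index, elem in enumerate(P10table):
--         permKeyList[index] = keyList[elem - 1]
--     shiftedOnceKey = leftShift(permKeyList)
--     shiftedTwiceKey = leftShift(leftShift(shiftedOnceKey))
--     subKey1 = subKey2 = 0
--     for index, elem in enumerate(P8table):
--         subKey1 += (128 >> index) * shiftedOnceKey[elem - 1]
--         subKey2 += (128 >> index) * shiftedTwiceKey[elem - 1]
--     return (subKey1, subKey2)
--
-- def fk(subKey, inputData):
--     """Apply Feistel function on data with given subkey"""
--     def F(sKey, rightNibble):
--         aux = sKey ^ perm(swapNibbles(rightNibble), EPtable)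
--         index1 = ((aux & 0x80) >> 4) + ((aux & 0x40) >> 5) + \
--                  ((aux & 0x20) >> 5) + ((aux & 0x10) >> 2)
--         index2 = ((aux & 0x08) >> 0) + ((aux & 0x04) >> 1) + \
--                  ((aux & 0x02) >> 1) + ((aux & 0x01) << 2)
--         sboxOutputs = swapNibbles((S0table[index1] << 2) + S1table[index2])
--         return perm(sboxOutputs, P4table)
--
--     leftNibble, rightNibble = inputData & 0xf0, inputData & 0x0f
--     return (leftNibble ^ F(subKey, rightNibble)) | rightNibble
--
-- def encrypt(key, plaintext):
--     """Encrypt plaintext with given key"""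
--     data = fk(keyGen(key)[0], ip(plaintext))
--     return fp(fk(keyGen(key)[1], swapNibbles(data)))
--
-- def TripleDES_3key_encrypt(k1: int, k2: int, k3: int, plaintext: str) -> str:
--     ciphertext1 = []
--     ciphertext2 = []
--     ciphertext3 = []
--
--     for i in plaintext:
--         a = encrypt(k1, ord(i))
--         ciphertext1.append(a)
--
--     for i in ciphertext1:
--         b = encrypt(k2, i)
--         ciphertext2.append(b)
--
--     for i in ciphertext2:
--         c = encrypt(k3, i)
--         ciphertext3.append(c)
--
--     return "".join(chr(i) for i in ciphertext3)
-- ===== SOURCE B (Python) =====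
-- # B: bit-list S-DES pipeline (bytes as MSB-first bit lists, permutations as
-- # table gathers), subkeys computed once, a 256-entry substitution table, and a
-- # single output pass.
-- IPtable = (2, 6, 3, 1, 4, 8, 5, 7)
-- FPtable = (4, 1, 3, 5, 7, 2, 8, 6)
-- P10table = (3, 5, 2, 7, 4, 10, 1, 9, 8, 6)
-- P8table = (6, 3, 7, 4, 8, 5, 10, 9)
-- S0table = (1, 0, 3, 2, 3, 2, 1, 0, 0, 2, 1, 3, 3, 1, 3, 2)
-- S1table = (0, 1, 2, 3, 2, 0, 1, 3, 3, 0, 1, 0, 2, 1, 0, 3)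
--
-- def byteBits(b):
--     """8 bits of b, most significant first"""
--     return [(b >> (7 - i)) & 1 for i in range(8)]
--
-- def fromBits(bits):
--     v = 0
--     for x in bits:
--         v = 2 * v + x
--     return v
--
-- def gather(bits, table):
--     return [bits[p - 1] for p in table]
--
-- def subkeys(key):
--     kb = [(key & (1 << (9 - i))) >> (9 - i) for i in range(10)]  # 10 key bits, MSB first
--     p10 = gather(kb, P10table)
--     r1 = p10[1:5] + p10[0:1] + p10[6:10] + p10[5:6]  # both halves rotated left 1
--     r3 = r1[2:5] + r1[0:2] + r1[7:10] + r1[5:7]      # rotated left by 2 more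
--     return fromBits(gather(r1, P8table)), fromBits(gather(r3, P8table))
--
-- def roundF(sk, bits):
--     """one Feistel round on an 8-bit list"""
--     l, r = bits[:4], bits[4:]
--     ep = [r[3], r[0], r[1], r[2], r[1], r[2], r[3], r[0]]
--     a = byteBits(sk ^ fromBits(ep))
--     s0 = S0table[8 * a[0] + 2 * a[1] + a[2] + 4 * a[3]]
--     s1 = S1table[8 * a[4] + 2 * a[5] + a[6] + 4 * a[7]]
--     f = [s0 & 1, s1 & 1, s1 >> 1, s0 >> 1]
--     return [x ^ y for x, y in zip(l, f)] + r
--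
-- def encryptByte(sk, b):
--     bits = gather(byteBits(b), IPtable)
--     bits = roundF(sk[0], bits)
--     bits = bits[4:] + bits[:4]            # swap the two nibbles
--     bits = roundF(sk[1], bits)
--     return fromBits(gather(bits, FPtable))
--
-- def TripleDES_3key_encrypt(k1: int, k2: int, k3: int, plaintext: str) -> str:
--     s1, s2, s3 = subkeys(k1), subkeys(k2), subkeys(k3)
--     sub = [encryptByte(s3, encryptByte(s2, encryptByte(s1, b))) for b in range(256)]
--     return "".join(chr(sub[ord(c)]) for c in plaintext)
-- ===== Notes on version B (the rewrite author's own statement) =====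
-- stated objective: faster
-- what changed: B replaces A's integer bit-masking S-DES with a bit-list pipeline (bytes as MSB-first bit lists, permutations as table gathers, the key schedule as list rotations), computes the six subkeys once, tabulates the composed triple encryption in a 256-entry byte-to-byte table and emits the ciphertext in a single pass, instead of A's three sequential list-building passes that re-run keyGen six times per character.
import Mathlib
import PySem

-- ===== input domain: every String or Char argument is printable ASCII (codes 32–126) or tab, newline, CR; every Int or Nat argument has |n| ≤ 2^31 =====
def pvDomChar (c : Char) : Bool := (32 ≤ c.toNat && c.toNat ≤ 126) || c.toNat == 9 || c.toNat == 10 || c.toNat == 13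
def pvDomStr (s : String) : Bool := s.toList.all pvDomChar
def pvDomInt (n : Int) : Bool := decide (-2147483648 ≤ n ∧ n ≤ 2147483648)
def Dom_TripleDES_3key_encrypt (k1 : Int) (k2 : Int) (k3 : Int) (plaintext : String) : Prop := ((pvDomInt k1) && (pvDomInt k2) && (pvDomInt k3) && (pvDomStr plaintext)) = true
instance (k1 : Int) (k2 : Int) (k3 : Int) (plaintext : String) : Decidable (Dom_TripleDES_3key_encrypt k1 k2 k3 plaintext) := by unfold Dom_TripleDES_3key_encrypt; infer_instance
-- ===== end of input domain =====

-- B re-implements the S-DES pipeline on MSB-first bit LISTS (permutations as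
-- table gathers, key schedule as list rotations), computes the six subkeys
-- once, tabulates the composed triple encryption over all 256 bytes and maps
-- the plaintext in a single pass (objective: faster by a constant factor).

-- ===== PORT A =====
-- module-level permutation/S-box tables shared by the module's helpers
def sdesIPtable : List Int := [2, 6, 3, 1, 4, 8, 5, 7]
def sdesFPtable : List Int := [4, 1, 3, 5, 7, 2, 8, 6]
def sdesP10table : List Int := [3, 5, 2, 7, 4, 10, 1, 9, 8, 6]
def sdesP8table : List Int := [6, 3, 7, 4, 8, 5, 10, 9]
def sdesEPtable : List Int := [4, 1, 2, 3, 2, 3, 4, 1]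
def sdesS0table : List Int := [1, 0, 3, 2, 3, 2, 1, 0, 0, 2, 1, 3, 3, 1, 3, 2]
def sdesS1table : List Int := [0, 1, 2, 3, 2, 0, 1, 3, 3, 0, 1, 0, 2, 1, 0, 3]
def sdesP4table : List Int := [2, 4, 3, 1]

-- perm: loop over enumerate(permTable); the shift amounts are nonnegative under
-- the branch guards, so .toNat on them is exact
def sdesPerm (inputByte : Int) (permTable : List Int) : Int :=
  (PySem.List.enumerate permTable).foldl (fun outputByte ie =>
    let index := ie.1
    let elem := ie.2
    if index ≥ elem then
      PySem.Int.bor outputByte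
        ((PySem.Int.band inputByte ((128 : Int) >>> (elem - 1).toNat)) >>> (index - (elem - 1)).toNat)
    else
      PySem.Int.bor outputByte
        ((PySem.Int.band inputByte ((128 : Int) >>> (elem - 1).toNat)) <<< ((elem - 1) - index).toNat)) 0

def sdesIp (inputByte : Int) : Int := sdesPerm inputByte sdesIPtable

def sdesFp (inputByte : Int) : Int := sdesPerm inputByte sdesFPtable

def sdesSwapNibbles (inputByte : Int) : Int :=
  PySem.Int.band (PySem.Int.bor (inputByte <<< 4) (inputByte >>> 4)) 0xff

-- leftShift: slice-assignment into [None]*10; the placeholder at index 9 (here 0)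
-- is always overwritten by the following set, so the transliteration is exact
def sdesLeftShift (keyBitList : List Int) : List Int :=
  PySem.List.pySetD
    (PySem.List.pySetD (PySem.List.slice keyBitList (some 1) (some 10) ++ [0]) 4
      (PySem.List.pyGetD keyBitList 0 0)) 9
    (PySem.List.pyGetD keyBitList 5 0)

def sdesKeyGen (key : Int) : Int × Int :=
  let keyList : List Int :=
    ((List.range 10).reverse).map (fun i => (PySem.Int.band key ((1 : Int) <<< i)) >>> i)
  let permKeyList : List Int :=
    sdesP10table.map (fun elem => PySem.List.pyGetD keyList (elem - 1) 0)
  let shiftedOnceKey := sdesLeftShift permKeyList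
  let shiftedTwiceKey := sdesLeftShift (sdesLeftShift shiftedOnceKey)
  (PySem.List.enumerate sdesP8table).foldl (fun sk ie =>
      (sk.1 + ((128 : Int) >>> ie.1.toNat) * PySem.List.pyGetD shiftedOnceKey (ie.2 - 1) 0,
       sk.2 + ((128 : Int) >>> ie.1.toNat) * PySem.List.pyGetD shiftedTwiceKey (ie.2 - 1) 0))
    (0, 0)

def sdesF (sKey : Int) (rightNibble : Int) : Int :=
  let aux := PySem.Int.bxor sKey (sdesPerm (sdesSwapNibbles rightNibble) sdesEPtable)
  let index1 := ((PySem.Int.band aux 0x80) >>> 4) + ((PySem.Int.band aux 0x40) >>> 5) +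
                ((PySem.Int.band aux 0x20) >>> 5) + ((PySem.Int.band aux 0x10) >>> 2)
  let index2 := (PySem.Int.band aux 0x08) + ((PySem.Int.band aux 0x04) >>> 1) +
                ((PySem.Int.band aux 0x02) >>> 1) + ((PySem.Int.band aux 0x01) <<< 2)
  let sboxOutputs :=
    sdesSwapNibbles ((PySem.List.pyGetD sdesS0table index1 0 <<< 2) + PySem.List.pyGetD sdesS1table index2 0)
  sdesPerm sboxOutputs sdesP4table

def sdesFk (subKey : Int) (inputData : Int) : Int :=
  let leftNibble := PySem.Int.band inputData 0xf0
  let rightNibble := PySem.Int.band inputData 0x0f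
  PySem.Int.bor (PySem.Int.bxor leftNibble (sdesF subKey rightNibble)) rightNibble

def sdesEncrypt (key : Int) (plaintext : Int) : Int :=
  let data := sdesFk (sdesKeyGen key).1 (sdesIp plaintext)
  sdesFp (sdesFk (sdesKeyGen key).2 (sdesSwapNibbles data))

-- A: three append loops building three intermediate ciphertext lists, then join
def TripleDES_3key_encrypt (k1 : Int) (k2 : Int) (k3 : Int) (plaintext : String) : String :=
  let ciphertext1 := plaintext.toList.foldl (fun acc i => acc ++ [sdesEncrypt k1 (i.toNat : Int)]) []
  let ciphertext2 := ciphertext1.foldl (fun acc i => acc ++ [sdesEncrypt k2 i]) []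
  let ciphertext3 := ciphertext2.foldl (fun acc i => acc ++ [sdesEncrypt k3 i]) []
  String.ofList (ciphertext3.map (fun i => Char.ofNat i.toNat))

-- ===== PORT B =====
-- a byte as its 8 bits, most significant first
def bbByteBits (b : Int) : List Int :=
  (List.range 8).map (fun i => PySem.Int.band (b >>> (7 - i)) 1)

def bbFromBits (bits : List Int) : Int :=
  bits.foldl (fun v x => 2 * v + x) 0

def bbGather (bits : List Int) (table : List Int) : List Int :=
  table.map (fun p => PySem.List.pyGetD bits (p - 1) 0)

def bbSubkeys (key : Int) : Int × Int :=
  let kb := (List.range 10).map (fun i => (PySem.Int.band key ((1 : Int) <<< (9 - i))) >>> (9 - i))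
  let p10 := bbGather kb sdesP10table
  let r1 := PySem.List.slice p10 (some 1) (some 5) ++ PySem.List.slice p10 (some 0) (some 1) ++
            PySem.List.slice p10 (some 6) (some 10) ++ PySem.List.slice p10 (some 5) (some 6)
  let r3 := PySem.List.slice r1 (some 2) (some 5) ++ PySem.List.slice r1 (some 0) (some 2) ++
            PySem.List.slice r1 (some 7) (some 10) ++ PySem.List.slice r1 (some 5) (some 7)
  (bbFromBits (bbGather r1 sdesP8table), bbFromBits (bbGather r3 sdesP8table))

def bbRoundF (sk : Int) (bits : List Int) : List Int :=
  let l := PySem.List.slice bits none (some 4)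
  let r := PySem.List.slice bits (some 4) none
  let ep := [PySem.List.pyGetD r 3 0, PySem.List.pyGetD r 0 0, PySem.List.pyGetD r 1 0, PySem.List.pyGetD r 2 0,
             PySem.List.pyGetD r 1 0, PySem.List.pyGetD r 2 0, PySem.List.pyGetD r 3 0, PySem.List.pyGetD r 0 0]
  let a := bbByteBits (PySem.Int.bxor sk (bbFromBits ep))
  let s0 := PySem.List.pyGetD sdesS0table
      (8 * PySem.List.pyGetD a 0 0 + 2 * PySem.List.pyGetD a 1 0 + PySem.List.pyGetD a 2 0 + 4 * PySem.List.pyGetD a 3 0) 0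
  let s1 := PySem.List.pyGetD sdesS1table
      (8 * PySem.List.pyGetD a 4 0 + 2 * PySem.List.pyGetD a 5 0 + PySem.List.pyGetD a 6 0 + 4 * PySem.List.pyGetD a 7 0) 0
  let f := [PySem.Int.band s0 1, PySem.Int.band s1 1, s1 >>> 1, s0 >>> 1]
  (List.zip l f).map (fun xy => PySem.Int.bxor xy.1 xy.2) ++ r

def bbEncryptByte (sk : Int × Int) (b : Int) : Int :=
  let bits0 := bbGather (bbByteBits b) sdesIPtable
  let bits1 := bbRoundF sk.1 bits0
  let bits2 := PySem.List.slice bits1 (some 4) none ++ PySem.List.slice bits1 none (some 4)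
  let bits3 := bbRoundF sk.2 bits2
  bbFromBits (bbGather bits3 sdesFPtable)

-- B: subkeys once, a 256-entry substitution table, one output pass
def TripleDES_3key_encrypt_alt (k1 : Int) (k2 : Int) (k3 : Int) (plaintext : String) : String :=
  let s1 := bbSubkeys k1
  let s2 := bbSubkeys k2
  let s3 := bbSubkeys k3
  let sub := (List.range 256).map (fun b : Nat => bbEncryptByte s3 (bbEncryptByte s2 (bbEncryptByte s1 (Int.ofNat b))))
  String.ofList (plaintext.toList.map (fun c => Char.ofNat (sub.getD c.toNat 0).toNat))

-- ===== PRECONDITION & SPEC =====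
def Spec_TripleDES_3key_encrypt (k1 : Int) (k2 : Int) (k3 : Int) (plaintext : String) (out : String) : Prop := out = TripleDES_3key_encrypt_alt k1 k2 k3 plaintext
instance (k1 : Int) (k2 : Int) (k3 : Int) (plaintext : String) (out : String) : Decidable (Spec_TripleDES_3key_encrypt k1 k2 k3 plaintext out) := by unfold Spec_TripleDES_3key_encrypt; infer_instance

-- ===== CLAIM (what is proved, stated in full; the proofs are below) =====
def Claim_equal_TripleDES_3key_encrypt : Prop := ∀ (k1 : Int) (k2 : Int) (k3 : Int) (plaintext : String), Dom_TripleDES_3key_encrypt k1 k2 k3 plaintext → Spec_TripleDES_3key_encrypt k1 k2 k3 plaintext (TripleDES_3key_encrypt k1 k2 k3 plaintext)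

-- ===== LEMMAS AND PROOFS =====

-- ---- finite-check transfer helpers ----
theorem all256 {p : Int → Bool} (h : ((List.range 256).all fun n => p (n : Int)) = true)
    {x : Int} (h0 : 0 ≤ x) (h1 : x < 256) : p x = true := by
  have hx : ((x.toNat : Nat) : Int) = x := Int.toNat_of_nonneg h0
  rw [← hx]
  exact List.all_eq_true.mp h _ (List.mem_range.mpr (by omega))

theorem all16sq {p : Int → Int → Bool}
    (h : ((List.range 16).all fun a => (List.range 16).all fun b => p (a : Int) (b : Int)) = true)
    {x y : Int} (hx0 : 0 ≤ x) (hx1 : x < 16) (hy0 : 0 ≤ y) (hy1 : y < 16) : p x y = true := by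
  have hx : ((x.toNat : Nat) : Int) = x := Int.toNat_of_nonneg hx0
  have hy : ((y.toNat : Nat) : Int) = y := Int.toNat_of_nonneg hy0
  rw [← hx, ← hy]
  have hmem := List.all_eq_true.mp h _ (List.mem_range.mpr (show x.toNat < 16 by omega))
  exact List.all_eq_true.mp hmem _ (List.mem_range.mpr (by omega))

-- ---- abstract key bits ----
def kbit (k : Int) (j : Nat) : Int := (PySem.Int.band k ((1 : Int) <<< (j : Int))) >>> (j : Int)

theorem kbit_natshift (k : Int) (j : Nat) : kbit k j = (PySem.Int.band k ((1 : Int) <<< j)) >>> j := by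
  simp [kbit, Int.shiftLeft_natCast_right, Int.shiftRight_natCast_right]

theorem pow_shift_nat (t j : Nat) : (((t * 2 ^ j : Nat) : Int) >>> j) = t := by
  rw [← Int.natCast_shiftRight, Nat.shiftRight_eq_div_pow,
    Nat.mul_div_cancel _ (Nat.two_pow_pos j)]

-- a key bit is 0 or 1
theorem kbit01 (k : Int) (j : Nat) : kbit k j = 0 ∨ kbit k j = 1 := by
  rw [kbit_natshift]
  unfold PySem.Int.band
  have h2 : ((1 : Int) <<< j) = ((2 ^ j : Nat) : Int) := by
    rw [Int.shiftLeft_eq]; push_cast; ring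
  rw [h2]
  have h2n : (0:Int) ≤ ((2 ^ j : Nat) : Int) := by positivity
  by_cases hk : 0 ≤ k
  · simp only [hk, if_true, h2n, Int.toNat_natCast]
    rw [Nat.and_two_pow]
    cases ht : (k.toNat.testBit j)
    · left; simpa using pow_shift_nat 0 j
    · right; simpa using pow_shift_nat 1 j
  · simp only [hk, if_false, h2n, if_true, Int.toNat_natCast]
    rw [Nat.and_comm, Nat.and_two_pow]
    cases ht : ((-k - 1).toNat.testBit j)
    · right
      simp only [Bool.toNat_false, zero_mul, Nat.sub_zero]
      simpa using pow_shift_nat 1 j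
    · left
      simp only [Bool.toNat_true, one_mul, Nat.sub_self]
      simpa using pow_shift_nat 0 j

-- the rest of A's keyGen after its keyList, verbatim
def kgCore (keyList : List Int) : Int × Int :=
  let permKeyList : List Int :=
    sdesP10table.map (fun elem => PySem.List.pyGetD keyList (elem - 1) 0)
  let shiftedOnceKey := sdesLeftShift permKeyList
  let shiftedTwiceKey := sdesLeftShift (sdesLeftShift shiftedOnceKey)
  (PySem.List.enumerate sdesP8table).foldl (fun sk ie =>
      (sk.1 + ((128 : Int) >>> ie.1.toNat) * PySem.List.pyGetD shiftedOnceKey (ie.2 - 1) 0,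
       sk.2 + ((128 : Int) >>> ie.1.toNat) * PySem.List.pyGetD shiftedTwiceKey (ie.2 - 1) 0))
    (0, 0)

-- the rest of B's subkeys after its kb list, verbatim
def bsCore (kb : List Int) : Int × Int :=
  let p10 := bbGather kb sdesP10table
  let r1 := PySem.List.slice p10 (some 1) (some 5) ++ PySem.List.slice p10 (some 0) (some 1) ++
            PySem.List.slice p10 (some 6) (some 10) ++ PySem.List.slice p10 (some 5) (some 6)
  let r3 := PySem.List.slice r1 (some 2) (some 5) ++ PySem.List.slice r1 (some 0) (some 2) ++
            PySem.List.slice r1 (some 7) (some 10) ++ PySem.List.slice r1 (some 5) (some 7)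
  (bbFromBits (bbGather r1 sdesP8table), bbFromBits (bbGather r3 sdesP8table))

theorem keyGen_as_core (k : Int) :
    sdesKeyGen k = kgCore (((List.range 10).reverse).map (fun i => (PySem.Int.band k ((1 : Int) <<< i)) >>> i)) := rfl

theorem subkeys_as_core (k : Int) :
    bbSubkeys k = bsCore ((List.range 10).map (fun i => (PySem.Int.band k ((1 : Int) <<< (9 - i))) >>> (9 - i))) := rfl

theorem klistA (k : Int) :
    ((List.range 10).reverse).map (fun i => (PySem.Int.band k ((1 : Int) <<< i)) >>> i) =
    [kbit k 9, kbit k 8, kbit k 7, kbit k 6, kbit k 5, kbit k 4, kbit k 3, kbit k 2, kbit k 1, kbit k 0] := by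
  simp only [show (List.range 10).reverse = [9,8,7,6,5,4,3,2,1,0] from rfl]
  norm_num [kbit]

theorem klistB (k : Int) :
    (List.range 10).map (fun i => (PySem.Int.band k ((1 : Int) <<< (9 - i))) >>> (9 - i)) =
    [kbit k 9, kbit k 8, kbit k 7, kbit k 6, kbit k 5, kbit k 4, kbit k 3, kbit k 2, kbit k 1, kbit k 0] := by
  simp only [show List.range 10 = [0,1,2,3,4,5,6,7,8,9] from rfl]
  norm_num [kbit]

set_option maxHeartbeats 1000000 in
theorem kgCore_closed (t9 t8 t7 t6 t5 t4 t3 t2 t1 t0 : Int) :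
    kgCore [t9, t8, t7, t6, t5, t4, t3, t2, t1, t0] =
      (0 + 128 * t9 + 64 * t3 + 32 * t1 + 16 * t6 + 8 * t2 + 4 * t7 + 2 * t0 + 1 * t4,
       0 + 128 * t2 + 64 * t7 + 32 * t4 + 16 * t5 + 8 * t0 + 4 * t8 + 2 * t1 + 1 * t9) := by
  simp [kgCore, sdesLeftShift, sdesP10table, sdesP8table, PySem.List.enumerate, pysem,
    show ((128:Int) >>> (0:Int)) = 128 by decide, show ((128:Int) >>> (1:Int)) = 64 by decide,
    show ((128:Int) >>> (2:Int)) = 32 by decide, show ((128:Int) >>> (3:Int)) = 16 by decide,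
    show ((128:Int) >>> (4:Int)) = 8 by decide, show ((128:Int) >>> (5:Int)) = 4 by decide,
    show ((128:Int) >>> (6:Int)) = 2 by decide, show ((128:Int) >>> (7:Int)) = 1 by decide]

set_option maxHeartbeats 1000000 in
theorem bsCore_closed (t9 t8 t7 t6 t5 t4 t3 t2 t1 t0 : Int) :
    bsCore [t9, t8, t7, t6, t5, t4, t3, t2, t1, t0] =
      (2 * (2 * (2 * (2 * (2 * (2 * (2 * (2 * 0 + t9) + t3) + t1) + t6) + t2) + t7) + t0) + t4,
       2 * (2 * (2 * (2 * (2 * (2 * (2 * (2 * 0 + t2) + t7) + t4) + t5) + t0) + t8) + t1) + t9) := by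
  simp [bsCore, bbGather, bbFromBits, sdesP10table, sdesP8table, pysem]

-- the two key schedules compute the same pair of subkeys
theorem keyGen_eq (k : Int) : bbSubkeys k = sdesKeyGen k := by
  rw [keyGen_as_core, subkeys_as_core, klistA, klistB, kgCore_closed, bsCore_closed]
  simp only [Prod.mk.injEq]
  constructor <;> ring

-- both subkeys are bytes
theorem keyGen_bounds (k : Int) :
    0 ≤ (sdesKeyGen k).1 ∧ (sdesKeyGen k).1 < 256 ∧ 0 ≤ (sdesKeyGen k).2 ∧ (sdesKeyGen k).2 < 256 := by
  rw [keyGen_as_core, klistA, kgCore_closed]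
  have hb : ∀ j : Nat, 0 ≤ kbit k j ∧ kbit k j ≤ 1 := by
    intro j; rcases kbit01 k j with h | h <;> simp [h]
  have h0 := hb 0; have h1 := hb 1; have h2 := hb 2; have h3 := hb 3; have h4 := hb 4
  have h5 := hb 5; have h6 := hb 6; have h7 := hb 7; have h8 := hb 8; have h9 := hb 9
  refine ⟨?_, ?_, ?_, ?_⟩ <;> · simp only; omega

-- ---- per-byte stage checks (each a finite verification) ----
-- a nibble as its 4 bits, most significant first
def nib4 (n : Int) : List Int :=
  [PySem.Int.band (n >>> 3) 1, PySem.Int.band (n >>> 2) 1, PySem.Int.band (n >>> 1) 1, PySem.Int.band n 1]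

-- the EP selection B performs on the bit list, verbatim from bbRoundF
def epOf (bits : List Int) : List Int :=
  let r := PySem.List.slice bits (some 4) none
  [PySem.List.pyGetD r 3 0, PySem.List.pyGetD r 0 0, PySem.List.pyGetD r 1 0, PySem.List.pyGetD r 2 0,
   PySem.List.pyGetD r 1 0, PySem.List.pyGetD r 2 0, PySem.List.pyGetD r 3 0, PySem.List.pyGetD r 0 0]

-- B's f list as a function of the xored byte, verbatim from bbRoundF
def fvalB (aux : Int) : List Int :=
  let a := bbByteBits aux
  let s0 := PySem.List.pyGetD sdesS0table
      (8 * PySem.List.pyGetD a 0 0 + 2 * PySem.List.pyGetD a 1 0 + PySem.List.pyGetD a 2 0 + 4 * PySem.List.pyGetD a 3 0) 0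
  let s1 := PySem.List.pyGetD sdesS1table
      (8 * PySem.List.pyGetD a 4 0 + 2 * PySem.List.pyGetD a 5 0 + PySem.List.pyGetD a 6 0 + 4 * PySem.List.pyGetD a 7 0) 0
  [PySem.Int.band s0 1, PySem.Int.band s1 1, s1 >>> 1, s0 >>> 1]

-- A's F as a function of the xored byte (everything after aux), verbatim from sdesF
def sdesFcore (aux : Int) : Int :=
  let index1 := ((PySem.Int.band aux 0x80) >>> 4) + ((PySem.Int.band aux 0x40) >>> 5) +
                ((PySem.Int.band aux 0x20) >>> 5) + ((PySem.Int.band aux 0x10) >>> 2)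
  let index2 := (PySem.Int.band aux 0x08) + ((PySem.Int.band aux 0x04) >>> 1) +
                ((PySem.Int.band aux 0x02) >>> 1) + ((PySem.Int.band aux 0x01) <<< 2)
  let sboxOutputs :=
    sdesSwapNibbles ((PySem.List.pyGetD sdesS0table index1 0 <<< 2) + PySem.List.pyGetD sdesS1table index2 0)
  sdesPerm sboxOutputs sdesP4table

theorem sdesFk_shape (s x : Int) :
    sdesFk s x =
      PySem.Int.bor
        (PySem.Int.bxor (PySem.Int.band x 0xf0)
          (sdesFcore (PySem.Int.bxor s (sdesPerm (sdesSwapNibbles (PySem.Int.band x 0x0f)) sdesEPtable))))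
        (PySem.Int.band x 0x0f) := rfl

theorem bbRoundF_shape (sk : Int) (bits : List Int) :
    bbRoundF sk bits =
      (List.zip (PySem.List.slice bits none (some 4))
        (fvalB (PySem.Int.bxor sk (bbFromBits (epOf bits))))).map (fun xy => PySem.Int.bxor xy.1 xy.2) ++
      PySem.List.slice bits (some 4) none := rfl

def qsplitB (x : Int) : Bool :=
  (bbByteBits x == nib4 (x / 16) ++ nib4 (x % 16)) &&
  (PySem.Int.band x 240 == 16 * (x / 16)) && (PySem.Int.band x 15 == x % 16)

def qipB (x : Int) : Bool :=
  (bbGather (bbByteBits x) sdesIPtable == bbByteBits (sdesIp x)) &&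
  decide (0 ≤ sdesIp x) && decide (sdesIp x < 256)

def qepB (x : Int) : Bool :=
  (bbFromBits (epOf (bbByteBits x)) == sdesPerm (sdesSwapNibbles (PySem.Int.band x 15)) sdesEPtable) &&
  decide (0 ≤ sdesPerm (sdesSwapNibbles (PySem.Int.band x 15)) sdesEPtable) &&
  decide (sdesPerm (sdesSwapNibbles (PySem.Int.band x 15)) sdesEPtable < 256)

def qfB (aux : Int) : Bool :=
  (sdesFcore aux == 16 * bbFromBits (fvalB aux)) &&
  decide (0 ≤ bbFromBits (fvalB aux)) && decide (bbFromBits (fvalB aux) < 16) &&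
  (nib4 (bbFromBits (fvalB aux)) == fvalB aux)

def qswapB (x : Int) : Bool :=
  sdesSwapNibbles x == 16 * (x % 16) + x / 16

def qfpB (x : Int) : Bool :=
  (bbFromBits (bbGather (bbByteBits x) sdesFPtable) == sdesFp x) &&
  decide (0 ≤ sdesFp x) && decide (sdesFp x < 256)

def qxorB (a b : Int) : Bool :=
  (PySem.Int.bxor (16 * a) (16 * b) == 16 * PySem.Int.bxor a b) &&
  decide (0 ≤ PySem.Int.bxor a b) && decide (PySem.Int.bxor a b < 16) &&
  ((List.zip (nib4 a) (nib4 b)).map (fun xy => PySem.Int.bxor xy.1 xy.2) == nib4 (PySem.Int.bxor a b))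

def qcombineB (h l : Int) : Bool :=
  (PySem.Int.bor (16 * h) l == 16 * h + l) && (bbByteBits (16 * h + l) == nib4 h ++ nib4 l)

set_option maxRecDepth 100000 in
set_option maxHeartbeats 1600000 in
theorem qsplit_all : ((List.range 256).all fun n => qsplitB (n : Int)) = true := by decide
set_option maxRecDepth 100000 in
set_option maxHeartbeats 1600000 in
theorem qip_all : ((List.range 256).all fun n => qipB (n : Int)) = true := by decide
set_option maxRecDepth 100000 in
set_option maxHeartbeats 1600000 in
theorem qep_all : ((List.range 256).all fun n => qepB (n : Int)) = true := by decide
set_option maxRecDepth 100000 in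
set_option maxHeartbeats 1600000 in
theorem qf_all : ((List.range 256).all fun n => qfB (n : Int)) = true := by decide
set_option maxRecDepth 100000 in
set_option maxHeartbeats 1600000 in
theorem qswap_all : ((List.range 256).all fun n => qswapB (n : Int)) = true := by decide
set_option maxRecDepth 100000 in
set_option maxHeartbeats 1600000 in
theorem qfp_all : ((List.range 256).all fun n => qfpB (n : Int)) = true := by decide
set_option maxRecDepth 100000 in
set_option maxHeartbeats 1600000 in
theorem qxor_all : ((List.range 16).all fun a => (List.range 16).all fun b => qxorB (a : Int) (b : Int)) = true := by decide
set_option maxRecDepth 100000 in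
set_option maxHeartbeats 1600000 in
theorem qcombine_all : ((List.range 16).all fun a => (List.range 16).all fun b => qcombineB (a : Int) (b : Int)) = true := by decide

-- ---- splitting a bit list at the nibble boundary ----
theorem slice_take4 (a b : List Int) (h : a.length = 4) :
    PySem.List.slice (a ++ b) none (some 4) = a := by
  have h4 : (some (4:Int)) = some (((4:Nat) : Int)) := by norm_num
  rw [h4, PySem.List.slice_to_natCast, ← h, List.take_left]

theorem slice_drop4 (a b : List Int) (h : a.length = 4) :
    PySem.List.slice (a ++ b) (some 4) none = b := by
  have h4 : (some (4:Int)) = some (((4:Nat) : Int)) := by norm_num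
  rw [h4, PySem.List.slice_from_natCast, ← h, List.drop_left]

theorem nib4_length (n : Int) : (nib4 n).length = 4 := rfl

-- ---- the Feistel round on bit lists is the Feistel round on bytes ----
theorem bbRound_eq (s x : Int) (hs0 : 0 ≤ s) (hs1 : s < 256) (hx0 : 0 ≤ x) (hx1 : x < 256) :
    bbRoundF s (bbByteBits x) = bbByteBits (sdesFk s x) ∧ 0 ≤ sdesFk s x ∧ sdesFk s x < 256 := by
  have hq := all256 qsplit_all hx0 hx1
  unfold qsplitB at hq
  simp only [Bool.and_eq_true, beq_iff_eq] at hq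
  obtain ⟨⟨hbits, hb240⟩, hb15⟩ := hq
  have hqe := all256 qep_all hx0 hx1
  unfold qepB at hqe
  simp only [Bool.and_eq_true, beq_iff_eq, decide_eq_true_eq] at hqe
  obtain ⟨⟨hep, he0⟩, he1⟩ := hqe
  have hxh : 0 ≤ x / 16 ∧ x / 16 < 16 := by omega
  have hxl : 0 ≤ x % 16 ∧ x % 16 < 16 := by omega
  set e := sdesPerm (sdesSwapNibbles (PySem.Int.band x 15)) sdesEPtable with hedef
  set aux := PySem.Int.bxor s e with hauxdef
  have haux0 : 0 ≤ aux := by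
    rw [hauxdef, PySem.Int.bxor_of_nonneg hs0 he0]; positivity
  have haux1 : aux < 256 := by
    rw [hauxdef, PySem.Int.bxor_of_nonneg hs0 he0]
    have hlt : s.toNat ^^^ e.toNat < 2 ^ 8 :=
      Nat.xor_lt_two_pow (by omega) (by omega)
    have : ((s.toNat ^^^ e.toNat : Nat) : Int) < 256 := by exact_mod_cast hlt
    exact this
  have hqf := all256 qf_all haux0 haux1
  unfold qfB at hqf
  simp only [Bool.and_eq_true, beq_iff_eq, decide_eq_true_eq] at hqf
  obtain ⟨⟨⟨hfc, hfn0⟩, hfn1⟩, hnib⟩ := hqf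
  have hqx := all16sq qxor_all hxh.1 hxh.2 hfn0 hfn1
  unfold qxorB at hqx
  simp only [Bool.and_eq_true, beq_iff_eq, decide_eq_true_eq] at hqx
  obtain ⟨⟨⟨hx16, hxo0⟩, hxo1⟩, hxnib⟩ := hqx
  have hqc := all16sq qcombine_all hxo0 hxo1 hxl.1 hxl.2
  unfold qcombineB at hqc
  simp only [Bool.and_eq_true, beq_iff_eq] at hqc
  obtain ⟨hbor, hbb⟩ := hqc
  have hA : sdesFk s x = 16 * PySem.Int.bxor (x / 16) (bbFromBits (fvalB aux)) + x % 16 := by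
    rw [sdesFk_shape, ← hedef, ← hauxdef, hfc, hb240, hb15, hx16, hbor]
  refine ⟨?_, by rw [hA]; omega, by rw [hA]; omega⟩
  rw [bbRoundF_shape, hep, ← hauxdef, ← hnib, hA, hbb, hbits,
    slice_take4 _ _ (nib4_length _), slice_drop4 _ _ (nib4_length _), hxnib]

-- ---- the byte pipelines agree ----
theorem byte_eq (sk : Int × Int) (b : Int)
    (h10 : 0 ≤ sk.1) (h11 : sk.1 < 256) (h20 : 0 ≤ sk.2) (h21 : sk.2 < 256)
    (hb0 : 0 ≤ b) (hb1 : b < 256) :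
    bbEncryptByte sk b = sdesFp (sdesFk sk.2 (sdesSwapNibbles (sdesFk sk.1 (sdesIp b)))) ∧
    0 ≤ sdesFp (sdesFk sk.2 (sdesSwapNibbles (sdesFk sk.1 (sdesIp b)))) ∧
    sdesFp (sdesFk sk.2 (sdesSwapNibbles (sdesFk sk.1 (sdesIp b)))) < 256 := by
  have hip := all256 qip_all hb0 hb1
  unfold qipB at hip
  simp only [Bool.and_eq_true, beq_iff_eq, decide_eq_true_eq] at hip
  obtain ⟨⟨hgq, hip0⟩, hip1⟩ := hip
  have h1 := bbRound_eq sk.1 (sdesIp b) h10 h11 hip0 hip1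
  have hq1 := all256 qsplit_all h1.2.1 h1.2.2
  unfold qsplitB at hq1
  simp only [Bool.and_eq_true, beq_iff_eq] at hq1
  obtain ⟨⟨hbits1, _⟩, _⟩ := hq1
  have hsw := all256 qswap_all h1.2.1 h1.2.2
  unfold qswapB at hsw
  rw [beq_iff_eq] at hsw
  have hy1 := h1.2
  have hsw0 : 0 ≤ sdesSwapNibbles (sdesFk sk.1 (sdesIp b)) := by rw [hsw]; omega
  have hsw1 : sdesSwapNibbles (sdesFk sk.1 (sdesIp b)) < 256 := by rw [hsw]; omega
  have hq2 := all256 qsplit_all hsw0 hsw1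
  unfold qsplitB at hq2
  simp only [Bool.and_eq_true, beq_iff_eq] at hq2
  obtain ⟨⟨hbits2, _⟩, _⟩ := hq2
  have hdiv : sdesSwapNibbles (sdesFk sk.1 (sdesIp b)) / 16 = sdesFk sk.1 (sdesIp b) % 16 := by omega
  have hmod : sdesSwapNibbles (sdesFk sk.1 (sdesIp b)) % 16 = sdesFk sk.1 (sdesIp b) / 16 := by omega
  rw [hdiv, hmod] at hbits2
  have h2 := bbRound_eq sk.2 (sdesSwapNibbles (sdesFk sk.1 (sdesIp b))) h20 h21 hsw0 hsw1
  have hfp := all256 qfp_all h2.2.1 h2.2.2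
  unfold qfpB at hfp
  simp only [Bool.and_eq_true, beq_iff_eq, decide_eq_true_eq] at hfp
  obtain ⟨⟨hfpe, hfp0⟩, hfp1⟩ := hfp
  refine ⟨?_, hfp0, hfp1⟩
  show bbFromBits (bbGather (bbRoundF sk.2
      (PySem.List.slice (bbRoundF sk.1 (bbGather (bbByteBits b) sdesIPtable)) (some 4) none ++
       PySem.List.slice (bbRoundF sk.1 (bbGather (bbByteBits b) sdesIPtable)) none (some 4))) sdesFPtable) = _
  rw [hgq, h1.1, hbits1, slice_take4 _ _ (nib4_length _), slice_drop4 _ _ (nib4_length _), ← hbits2,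
    h2.1, hfpe]

-- ---- whole-byte encryption agrees for every key ----
theorem enc_eq (k b : Int) (hb0 : 0 ≤ b) (hb1 : b < 256) :
    bbEncryptByte (bbSubkeys k) b = sdesEncrypt k b ∧ 0 ≤ sdesEncrypt k b ∧ sdesEncrypt k b < 256 := by
  have hkb := keyGen_bounds k
  have h := byte_eq (sdesKeyGen k) b hkb.1 hkb.2.1 hkb.2.2.1 hkb.2.2.2 hb0 hb1
  have hE : sdesFp (sdesFk (sdesKeyGen k).2 (sdesSwapNibbles (sdesFk (sdesKeyGen k).1 (sdesIp b)))) =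
      sdesEncrypt k b := rfl
  rw [hE] at h
  rw [keyGen_eq]
  exact h

-- indexing the range-comprehension table is applying the tabulated function
theorem getD_map_range_lt {α : Type} (f : Nat → α) (n k : Nat) (d : α) (h : k < n) :
    (((List.range n).map f).getD k d) = f k := by
  rw [List.getD_eq_getElem?_getD, List.getElem?_map, List.getElem?_range h]
  rfl

-- ===== VERDICT (by name: the statement is the Claim_ definition above) =====
theorem TripleDES_3key_encrypt_spec : Claim_equal_TripleDES_3key_encrypt := by
  intro k1 k2 k3 plaintext hdom
  show TripleDES_3key_encrypt k1 k2 k3 plaintext = TripleDES_3key_encrypt_alt k1 k2 k3 plaintext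
  simp only [TripleDES_3key_encrypt, TripleDES_3key_encrypt_alt,
    PySem.List.foldl_append_singleton_eq_map, List.nil_append, List.map_map]
  refine congrArg String.ofList (List.map_congr_left fun c hc => ?_)
  have hdomc : pvDomChar c = true := by
    have hstr : pvDomStr plaintext = true := by
      unfold Dom_TripleDES_3key_encrypt at hdom
      simp only [Bool.and_eq_true] at hdom
      exact hdom.2
    exact List.all_eq_true.mp hstr c hc
  have hlt : c.toNat < 256 := by
    unfold pvDomChar at hdomc
    simp only [Bool.or_eq_true, Bool.and_eq_true, decide_eq_true_eq, beq_iff_eq] at hdomc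
    omega
  rw [getD_map_range_lt _ 256 c.toNat 0 hlt]
  simp only [Function.comp_apply, Int.ofNat_eq_natCast]
  have h1 := enc_eq k1 (c.toNat : Int) (by positivity) (by exact_mod_cast hlt)
  have h2 := enc_eq k2 (sdesEncrypt k1 (c.toNat : Int)) h1.2.1 h1.2.2
  have h3 := enc_eq k3 (sdesEncrypt k2 (sdesEncrypt k1 (c.toNat : Int))) h2.2.1 h2.2.2
  rw [h1.1, h2.1, h3.1]
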